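-- pv_equiv track=rewrite | github.com/slipps-MaizePath/Dump-Scrape | mapgen/fieldmaps.py | generate_passes
-- ===== SOURCE A (Python) =====
-- def generate_passes(rows):
--     """
--     :param rows: Number of rows in the field.
--     :return: Tuple containing an appropriate length set of paired (row, pass) indices.
--     """
--     digit_a = 1
--     digit_b = 1
--     passes = ()
--     increment = True
--
--     while len(passes) < rows:
--         passes += ("{0}.{1}".format(digit_a, digit_b),)
--
--         if increment:
--             digit_b += 1
--         else:
--             digit_b -= 1
--
--         if digit_b > 4:
--             increment = False
--             digit_b -= 1
--             digit_a += 1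
--         if digit_b < 1:
--             increment = True
--             digit_b += 1
--             digit_a += 1
--
--     return passes
-- ===== SOURCE B (Python) =====
-- def generate_passes(rows):
--     """Closed-form boustrophedon indices: each position i yields group i//4 and
--     offset i%4, ascending in even groups and descending in odd ones."""
--     out = []
--     i = 0
--     while i < rows:
--         g = i // 4
--         p = i % 4
--         b = p + 1 if g % 2 == 0 else 4 - p
--         out.append("{0}.{1}".format(g + 1, b))
--         i += 1
--     return tuple(out)
-- ===== Notes on version B (the rewrite author's own statement) =====
-- stated objective: simpler
-- what changed: Replaced A's stateful zig-zag walk (two digit counters, a direction flag and two boundary-correction branches) by a per-index closed form: position i gives group i//4 and offset i%4, ascending in even groups and descending in odd ones.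
import Mathlib
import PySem

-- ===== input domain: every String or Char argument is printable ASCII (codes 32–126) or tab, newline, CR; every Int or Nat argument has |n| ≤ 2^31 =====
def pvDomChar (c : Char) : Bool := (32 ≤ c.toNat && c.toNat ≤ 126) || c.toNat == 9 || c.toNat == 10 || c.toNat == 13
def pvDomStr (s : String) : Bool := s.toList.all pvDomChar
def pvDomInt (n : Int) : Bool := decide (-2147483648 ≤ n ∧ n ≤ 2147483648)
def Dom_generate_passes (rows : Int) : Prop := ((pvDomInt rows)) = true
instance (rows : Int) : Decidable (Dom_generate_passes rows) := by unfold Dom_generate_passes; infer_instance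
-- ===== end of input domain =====

-- B replaces A's stateful zig-zag walk (direction flag + boundary corrections) with a
-- per-index closed form (group i//4, offset i%4); objective: simpler.

-- ===== PORT A =====
-- A's while-loop, with its guard `len(passes) < rows` kept intact; `fuel` only bounds the
-- recursion depth for totality (rows.toNat always suffices, since each pass appends one
-- element). The two sequential `if` corrections of A are flattened into nested branches
-- carrying the same (increment, digit_b, digit_a) updates.
def pvLoopA : Nat → Int → Int → Int → List String → Bool → List String
  | 0, _, _, _, passes, _ => passes
  | fuel + 1, rows, digit_a, digit_b, passes, increment =>
    if (passes.length : Int) < rows then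
      let passes' := passes ++ [PySem.Int.toStr digit_a ++ "." ++ PySem.Int.toStr digit_b]
      let b1 : Int := if increment then digit_b + 1 else digit_b - 1
      if b1 > 4 then
        -- increment := False; digit_b := b1 - 1; digit_a += 1; then the `< 1` check
        if b1 - 1 < 1 then pvLoopA fuel rows (digit_a + 2) ((b1 - 1) + 1) passes' true
        else pvLoopA fuel rows (digit_a + 1) (b1 - 1) passes' false
      else
        if b1 < 1 then pvLoopA fuel rows (digit_a + 1) (b1 + 1) passes' true
        else pvLoopA fuel rows digit_a b1 passes' increment
    else passes

def generate_passes (rows : Int) : List String :=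
  pvLoopA rows.toNat rows 1 1 [] true

-- ===== PORT B =====
-- B's while-loop `while i < rows`; same fuel device for totality.
def pvLoopB : Nat → Int → Int → List String → List String
  | 0, _, _, out => out
  | fuel + 1, rows, i, out =>
    if i < rows then
      let g := PySem.Int.floordiv i 4
      let p := PySem.Int.mod i 4
      let b : Int := if PySem.Int.mod g 2 == 0 then p + 1 else 4 - p
      pvLoopB fuel rows (i + 1) (out ++ [PySem.Int.toStr (g + 1) ++ "." ++ PySem.Int.toStr b])
    else out

def generate_passes_alt (rows : Int) : List String :=
  pvLoopB rows.toNat rows 0 []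

-- ===== PRECONDITION & SPEC =====
def Spec_generate_passes (rows : Int) (out : List String) : Prop := out = generate_passes_alt rows
instance (rows : Int) (out : List String) : Decidable (Spec_generate_passes rows out) := by unfold Spec_generate_passes; infer_instance

-- ===== CLAIM (what is proved, stated in full; the proofs are below) =====
def Claim_equal_generate_passes : Prop := ∀ (rows : Int), Dom_generate_passes rows → Spec_generate_passes rows (generate_passes rows)

-- ===== LEMMAS AND PROOFS =====

theorem pv_floordiv_nat (i : Nat) : PySem.Int.floordiv (↑i) 4 = ↑(i / 4) := by
  exact_mod_cast PySem.Int.floordiv_natCast i 4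

theorem pv_mod_nat (i : Nat) : PySem.Int.mod (↑i) 4 = ↑(i % 4) := by
  exact_mod_cast PySem.Int.mod_natCast i 4

theorem pv_mod2_nat (q : Nat) : PySem.Int.mod (↑q) 2 = ↑(q % 2) := by
  exact_mod_cast PySem.Int.mod_natCast q 2

-- Bisimulation: A's loop state after i emitted strings is determined by i alone.
theorem pv_bisim (fuel : Nat) : ∀ (rows : Int) (i : Nat) (acc : List String),
    acc.length = i →
    pvLoopA fuel rows (↑(i / 4) + 1)
      (if i / 4 % 2 = 0 then (↑(i % 4) + 1 : Int) else 4 - ↑(i % 4)) acc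
      (decide (i / 4 % 2 = 0))
    = pvLoopB fuel rows ↑i acc := by
  induction fuel with
  | zero => intro rows i acc _; rfl
  | succ n ih =>
    intro rows i acc hlen
    by_cases h : (↑i : Int) < rows
    · rw [pvLoopA, pvLoopB, if_pos (by rw [hlen]; exact h), if_pos h]
      simp only [pv_floordiv_nat, pv_mod_nat, pv_mod2_nat, beq_iff_eq, Nat.cast_eq_zero]
      have hr : i % 4 = 0 ∨ i % 4 = 1 ∨ i % 4 = 2 ∨ i % 4 = 3 := by omega
      have hq : i / 4 % 2 = 0 ∨ i / 4 % 2 = 1 := by omega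
      rcases hq with hq | hq <;> rcases hr with hr | hr | hr | hr <;>
        · have e3 : (i + 1) / 4 % 2 = (i / 4 % 2 + i % 4 / 3) % 2 := by omega
          have e1 : (i + 1) / 4 = i / 4 + i % 4 / 3 := by omega
          have e2 : (i + 1) % 4 = (i % 4 + 1) % 4 := by omega
          have key := ih rows (i + 1)
            (acc ++ [PySem.Int.toStr (↑(i / 4) + 1) ++ "." ++
              PySem.Int.toStr (if i / 4 % 2 = 0 then (↑(i % 4) + 1 : Int) else 4 - ↑(i % 4))])
            (by simp [hlen])
          rw [e3, e1, e2] at key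
          generalize hL : (acc ++ [PySem.Int.toStr (↑(i / 4) + 1) ++ "." ++
              PySem.Int.toStr (if i / 4 % 2 = 0 then (↑(i % 4) + 1 : Int) else 4 - ↑(i % 4))]) = L at key ⊢
          simp only [hq, hr] at key ⊢
          norm_num at key ⊢
          push_cast at key ⊢
          ring_nf at key ⊢
          exact key
    · rw [pvLoopA, pvLoopB, if_neg (by rw [hlen]; exact h), if_neg h]

-- ===== VERDICT (by name: the statement is the Claim_ definition above) =====
theorem generate_passes_spec : Claim_equal_generate_passes := by
  intro rows _
  unfold Spec_generate_passes generate_passes generate_passes_alt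
  have := pv_bisim rows.toNat rows 0 [] rfl
  norm_num at this
  exact this
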